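-- pv_equiv track=rewrite | github.com/CherubelK/Alphabet_soup | Alphabet_Soup.py | ele_func
-- ===== SOURCE A (Python) =====
-- def ele_func(s):
--
--     up = []
--     lo = []
--     for i in sorted(s):
--         if i == i.upper():
--             up.append(i)
--         else:
--             lo.append(i)
--     upco = 0
--     loco = 0
--     out = []
--     for null in range(len(up)+len(lo)):
--         if upco == len(up):
--             out.extend(lo[loco:])
--             break
--         elif loco == len(lo):
--             out.extend(up[upco:])
--             break
--         else:
--             if up[upco].lower() == lo[loco] or up[upco].lower() < lo[loco]:
--                 out.append(up[upco])
--                 upco += 1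
--             else:
--                 out.append(lo[loco])
--                 loco += 1
--
--     return ''.join(out)
-- ===== SOURCE B (Python) =====
-- def ele_func(s):
--     counts = [0] * 128
--     for c in s:
--         counts[ord(c)] += 1
--     out = []
--     nxt = ord('a')
--     for code in range(128):
--         if counts[code] and not ('a' <= chr(code) <= 'z'):
--             limit = ord(chr(code).lower())
--             while nxt <= ord('z') and nxt < limit:
--                 out.append(chr(nxt) * counts[nxt])
--                 nxt += 1
--             out.append(chr(code) * counts[code])
--     for l in range(nxt, ord('z') + 1):
--         out.append(chr(l) * counts[l])
--     return ''.join(out)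
-- ===== Notes on version B (the rewrite author's own statement) =====
-- stated objective: faster
-- what changed: replaces sort-then-partition-then-pointer-merge by a counting sort over the fixed ASCII alphabet: one counting pass, then a sweep over the 128 codes that emits each non-lowercase block after flushing the lowercase letters smaller than its lowercase key
import Mathlib
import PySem

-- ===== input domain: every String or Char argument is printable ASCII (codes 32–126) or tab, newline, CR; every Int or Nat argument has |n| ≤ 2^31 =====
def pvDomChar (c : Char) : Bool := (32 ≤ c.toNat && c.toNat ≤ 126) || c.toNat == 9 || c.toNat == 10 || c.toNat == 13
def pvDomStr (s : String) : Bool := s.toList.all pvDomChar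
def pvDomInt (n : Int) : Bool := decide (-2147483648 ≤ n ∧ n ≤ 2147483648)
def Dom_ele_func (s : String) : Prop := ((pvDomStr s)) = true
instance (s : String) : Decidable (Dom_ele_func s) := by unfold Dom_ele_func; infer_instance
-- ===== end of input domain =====

-- B replaces A's sort + partition + pointer-merge by a counting sort over the fixed
-- 128-code ASCII alphabet (one counting pass, one sweep over the codes); objective: faster.
set_option maxRecDepth 8192


-- ===== PORT A =====
-- the 'for null in range(len(up)+len(lo))' merge loop, with 'break' modelled by returning
def eleMergeLoop (up lo : List Char) : Nat → Nat → Nat → List Char → List Char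
  | 0, _, _, out => out
  | fuel+1, upco, loco, out =>
    if upco = up.length then
      out ++ PySem.List.slice lo (some (loco : Int)) none
    else if loco = lo.length then
      out ++ PySem.List.slice up (some (upco : Int)) none
    else
      let u := PySem.List.pyGetD up (upco : Int) ' '
      let l := PySem.List.pyGetD lo (loco : Int) ' '
      if PySem.Chars.lowerChar u = l ∨ PySem.Chars.lowerChar u < l then
        eleMergeLoop up lo fuel (upco+1) loco (out ++ [u])
      else
        eleMergeLoop up lo fuel upco (loco+1) (out ++ [l])

def ele_func (s : String) : String :=
  let ul := (PySem.List.sorted s.toList (fun c => c) false).foldl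
      (fun (acc : List Char × List Char) i =>
        if i = PySem.Chars.upperChar i then (acc.1 ++ [i], acc.2) else (acc.1, acc.2 ++ [i]))
      ([], [])
  String.mk (eleMergeLoop ul.1 ul.2 (ul.1.length + ul.2.length) 0 0 [])

-- ===== PORT B =====
-- counts = [0]*128; for c in s: counts[ord(c)] += 1
def eleCounts (cs : List Char) : List Int :=
  cs.foldl (fun counts c =>
    PySem.List.pySetD counts (c.toNat : Int) (PySem.List.pyGetD counts (c.toNat : Int) 0 + 1))
    (List.replicate 128 0)

-- the 'while nxt <= ord('z') and nxt < limit' flush of pending lowercase counts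
def eleFlush (counts : List Int) (nxt limit : Nat) : List Char × Nat :=
  if nxt ≤ 122 ∧ nxt < limit then
    let piece := List.replicate (PySem.List.pyGetD counts (nxt : Int) 0).toNat (Char.ofNat nxt)
    let rest := eleFlush counts (nxt + 1) limit
    (piece ++ rest.1, rest.2)
  else ([], nxt)
termination_by limit - nxt

-- the 'for code in range(128)' sweep; state = (out, nxt)
def eleCodeLoop (counts : List Int) : List Nat → List Char → Nat → List Char × Nat
  | [], out, nxt => (out, nxt)
  | code :: rest, out, nxt =>
    if PySem.List.pyGetD counts (code : Int) 0 ≠ 0 ∧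
        ¬('a' ≤ Char.ofNat code ∧ Char.ofNat code ≤ 'z') then
      let limit := (PySem.Chars.lowerChar (Char.ofNat code)).toNat
      let fl := eleFlush counts nxt limit
      eleCodeLoop counts rest
        (out ++ fl.1 ++ List.replicate (PySem.List.pyGetD counts (code : Int) 0).toNat (Char.ofNat code))
        fl.2
    else eleCodeLoop counts rest out nxt

def ele_func_alt (s : String) : String :=
  let counts := eleCounts s.toList
  let r := eleCodeLoop counts (List.range 128) [] 97
  let out := (PySem.List.pyRange (r.2 : Int) 123 1).foldl
      (fun out l => out ++ List.replicate (PySem.List.pyGetD counts l 0).toNat (Char.ofNat l.toNat))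
      r.1
  String.mk out

-- ===== PRECONDITION & SPEC =====
def Spec_ele_func (s : String) (out : String) : Prop := out = ele_func_alt s
instance (s : String) (out : String) : Decidable (Spec_ele_func s out) := by unfold Spec_ele_func; infer_instance

-- ===== CLAIM (what is proved, stated in full; the proofs are below) =====
def Claim_equal_ele_func : Prop := ∀ (s : String), Dom_ele_func s → Spec_ele_func s (ele_func s)

-- ===== LEMMAS AND PROOFS =====

-- ===== character bridges =====
theorem pvChar_eq_of_toNat (a b : Char) (h : a.toNat = b.toNat) : a = b := by
  apply Char.ext; exact UInt32.toNat_inj.mp h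

theorem pvChar_le_iff (a b : Char) : a ≤ b ↔ a.toNat ≤ b.toNat := by
  rw [Char.le_def]; exact Iff.symm UInt32.le_iff_toNat_le

theorem pvChar_lt_iff (a b : Char) : a < b ↔ a.toNat < b.toNat := by
  rw [Char.lt_def]; exact Iff.symm UInt32.lt_iff_toNat_lt

theorem pvToNat_ofNat (i : Nat) (h : i < 128) : (Char.ofNat i).toNat = i := by
  have hv : i.isValidChar := by left; omega
  rw [Char.ofNat, dif_pos hv]
  simp [Char.toNat, Char.ofNatAux]

def pvIsUp (c : Char) : Bool := decide (c = PySem.Chars.upperChar c)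

theorem pvIslower_ofNat (i : Nat) (h : i < 128) :
    PySem.Chars.islower (Char.ofNat i) = (decide (97 ≤ i) && decide (i ≤ 122)) := by
  have ha : ('a' : Char).toNat = 97 := by decide
  have hz : ('z' : Char).toNat = 122 := by decide
  simp [PySem.Chars.islower, pvChar_le_iff, pvToNat_ofNat i h, ha, hz]

theorem pvIsUp_ofNat (i : Nat) (h : i < 128) :
    pvIsUp (Char.ofNat i) = !(decide (97 ≤ i) && decide (i ≤ 122)) := by
  by_cases hl : 97 ≤ i ∧ i ≤ 122
  · have hlow : PySem.Chars.islower (Char.ofNat i) = true := by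
      rw [pvIslower_ofNat i h]; simp [hl.1, hl.2]
    have hne : Char.ofNat i ≠ PySem.Chars.upperChar (Char.ofNat i) := by
      simp only [PySem.Chars.upperChar, hlow, if_pos]
      rw [pvToNat_ofNat i h]
      intro he
      have := congrArg Char.toNat he
      rw [pvToNat_ofNat i h, pvToNat_ofNat _ (by omega)] at this
      omega
    simp [pvIsUp, hne, hl.1, hl.2]
  · have hup : PySem.Chars.upperChar (Char.ofNat i) = Char.ofNat i := by
      have hlow : PySem.Chars.islower (Char.ofNat i) = false := by
        rw [pvIslower_ofNat i h]
        rcases Nat.lt_or_ge i 97 with h1 | h1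
        · simp; omega
        · simp; omega
      simp [PySem.Chars.upperChar, hlow]
    have hfalse : (decide (97 ≤ i) && decide (i ≤ 122)) = false := by
      rcases Nat.lt_or_ge i 97 with h1 | h1
      · simp; omega
      · simp; omega
    simp [pvIsUp, hup, hfalse]

theorem pvIsUp_true {c : Char} (h : c = PySem.Chars.upperChar c) : pvIsUp c = true := by
  simpa [pvIsUp] using h

theorem pvIsUp_false {c : Char} (h : ¬ c = PySem.Chars.upperChar c) : pvIsUp c = false := by
  simpa [pvIsUp] using h

-- ===== A's merge as a structural function =====
def pvMergeC : List Char → List Char → List Char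
  | [], l => l
  | u, [] => u
  | a :: u, b :: l =>
    if PySem.Chars.lowerChar a = b ∨ PySem.Chars.lowerChar a < b then a :: pvMergeC u (b :: l)
    else b :: pvMergeC (a :: u) l
termination_by u l => u.length + l.length

theorem pvMergeC_nil_right (u : List Char) : pvMergeC u [] = u := by
  cases u <;> simp [pvMergeC]

theorem pvFold_part (L : List Char) : ∀ (u0 l0 : List Char),
    L.foldl (fun (acc : List Char × List Char) i =>
        if i = PySem.Chars.upperChar i then (acc.1 ++ [i], acc.2) else (acc.1, acc.2 ++ [i]))
      (u0, l0)
    = (u0 ++ L.filter pvIsUp, l0 ++ L.filter (fun c => !pvIsUp c)) := by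
  induction L with
  | nil => intro u0 l0; simp
  | cons c cs ih =>
    intro u0 l0
    by_cases h : c = PySem.Chars.upperChar c
    · rw [List.foldl_cons, if_pos h, ih, List.filter_cons, List.filter_cons, pvIsUp_true h]
      simp
    · rw [List.foldl_cons, if_neg h, ih, List.filter_cons, List.filter_cons, pvIsUp_false h]
      simp

theorem pvLoop_eq (up lo : List Char) : ∀ (fuel upco loco : Nat) (out : List Char),
    upco ≤ up.length → loco ≤ lo.length →
    up.length - upco + (lo.length - loco) ≤ fuel →
    eleMergeLoop up lo fuel upco loco out = out ++ pvMergeC (up.drop upco) (lo.drop loco) := by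
  intro fuel
  induction fuel with
  | zero =>
    intro upco loco out h1 h2 h3
    have e1 : upco = up.length := by omega
    have e2 : loco = lo.length := by omega
    rw [eleMergeLoop, e1, e2]
    simp [List.drop_length, pvMergeC]
  | succ fuel ih =>
    intro upco loco out h1 h2 h3
    rw [eleMergeLoop]
    by_cases e1 : upco = up.length
    · rw [if_pos e1, e1]
      rw [PySem.List.slice_from_natCast]
      simp [List.drop_length, pvMergeC]
    · rw [if_neg e1]
      by_cases e2 : loco = lo.length
      · rw [if_pos e2, e2]
        rw [PySem.List.slice_from_natCast]
        simp [List.drop_length, pvMergeC_nil_right]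
      · rw [if_neg e2]
        have hu : upco < up.length := by omega
        have hl : loco < lo.length := by omega
        have du : up.drop upco = up[upco] :: up.drop (upco + 1) :=
          List.drop_eq_getElem_cons hu
        have dl : lo.drop loco = lo[loco] :: lo.drop (loco + 1) :=
          List.drop_eq_getElem_cons hl
        have gu : PySem.List.pyGetD up ((upco : Nat) : Int) ' ' = up[upco] :=
          PySem.List.pyGetD_ofNat _ _ _ hu
        have gl : PySem.List.pyGetD lo ((loco : Nat) : Int) ' ' = lo[loco] :=
          PySem.List.pyGetD_ofNat _ _ _ hl
        simp only [gu, gl]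
        by_cases hc : PySem.Chars.lowerChar up[upco] = lo[loco] ∨
            PySem.Chars.lowerChar up[upco] < lo[loco]
        · rw [if_pos hc, ih _ _ _ (by omega) (by omega) (by omega), du, dl,
            pvMergeC, ← dl, if_pos hc]
          simp
        · rw [if_neg hc, ih _ _ _ (by omega) (by omega) (by omega), du, dl,
            pvMergeC, ← du, if_neg hc]
          simp

-- ===== counting-sort vocabulary =====
def pvCnt (cs : List Char) (i : Nat) : Nat := cs.countP (fun c => decide (c.toNat = i))

def pvExpand (cs : List Char) (codes : List Nat) (keep : Nat → Bool) : List Char :=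
  codes.flatMap (fun i => if keep i then List.replicate (pvCnt cs i) (Char.ofNat i) else [])

def pvKeepUp (i : Nat) : Bool := !(decide (97 ≤ i) && decide (i ≤ 122))

def pvLoRest (cs : List Char) (nxt : Nat) : List Char :=
  pvExpand cs (List.range' nxt (123 - nxt)) (fun _ => true)

theorem pvExpand_nil (cs : List Char) (keep : Nat → Bool) : pvExpand cs [] keep = [] := rfl

theorem pvExpand_cons (cs : List Char) (i : Nat) (codes : List Nat) (keep : Nat → Bool) :
    pvExpand cs (i :: codes) keep
      = (if keep i then List.replicate (pvCnt cs i) (Char.ofNat i) else []) ++ pvExpand cs codes keep := by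
  simp [pvExpand]

theorem pvExpand_append (cs : List Char) (c1 c2 : List Nat) (keep : Nat → Bool) :
    pvExpand cs (c1 ++ c2) keep = pvExpand cs c1 keep ++ pvExpand cs c2 keep := by
  simp [pvExpand]

theorem pvExpand_congr (cs : List Char) (codes : List Nat) (k1 k2 : Nat → Bool)
    (h : ∀ i ∈ codes, k1 i = k2 i) : pvExpand cs codes k1 = pvExpand cs codes k2 := by
  induction codes with
  | nil => rfl
  | cons i rest ih =>
    rw [pvExpand_cons, pvExpand_cons, h i List.mem_cons_self,
      ih (fun j hj => h j (List.mem_cons_of_mem _ hj))]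

theorem pvExpand_none (cs : List Char) (codes : List Nat) (keep : Nat → Bool)
    (h : ∀ i ∈ codes, keep i = false) : pvExpand cs codes keep = [] := by
  induction codes with
  | nil => rfl
  | cons i rest ih =>
    rw [pvExpand_cons, h i List.mem_cons_self]
    simpa using ih (fun j hj => h j (List.mem_cons_of_mem _ hj))

theorem pvMem_expand (cs : List Char) (codes : List Nat) (keep : Nat → Bool) (x : Char)
    (hx : x ∈ pvExpand cs codes keep) : ∃ i ∈ codes, keep i = true ∧ x = Char.ofNat i := by
  induction codes with
  | nil => simp [pvExpand] at hx
  | cons i rest ih =>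
    rw [pvExpand_cons] at hx
    rcases List.mem_append.mp hx with h | h
    · by_cases hk : keep i = true
      · rw [if_pos hk] at h
        exact ⟨i, List.mem_cons_self, hk, (List.eq_of_mem_replicate h)⟩
      · rw [if_neg hk] at h; simp at h
    · rcases ih h with ⟨j, hj, hk, he⟩
      exact ⟨j, List.mem_cons_of_mem _ hj, hk, he⟩

-- ===== counts list facts =====
theorem pvCounts_fold (cs : List Char) : ∀ counts : List Int, counts.length = 128 →
    (∀ c ∈ cs, c.toNat < 128) →
    (cs.foldl (fun counts c =>
        PySem.List.pySetD counts (c.toNat : Int) (PySem.List.pyGetD counts (c.toNat : Int) 0 + 1))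
      counts).length = 128 ∧
    ∀ i, i < 128 →
      (cs.foldl (fun counts c =>
          PySem.List.pySetD counts (c.toNat : Int) (PySem.List.pyGetD counts (c.toNat : Int) 0 + 1))
        counts).getD i 0 = counts.getD i 0 + (pvCnt cs i : Int) := by
  induction cs with
  | nil => intro counts hlen _; exact ⟨hlen, by intro i _; simp [pvCnt]⟩
  | cons c t ih =>
    intro counts hlen hdom
    have hc128 : c.toNat < 128 := hdom c List.mem_cons_self
    have hset : PySem.List.pySetD counts ((c.toNat : Nat) : Int)
        (PySem.List.pyGetD counts ((c.toNat : Nat) : Int) 0 + 1)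
        = counts.set c.toNat (counts.getD c.toNat 0 + 1) := by
      rw [PySem.List.pySetD_natCast, PySem.List.pyGetD_natCast]
    have hlen' : (counts.set c.toNat (counts.getD c.toNat 0 + 1)).length = 128 := by
      simpa using hlen
    obtain ⟨hl, hg⟩ := ih _ hlen' (fun d hd => hdom d (List.mem_cons_of_mem _ hd))
    refine ⟨by rw [List.foldl_cons, hset]; exact hl, ?_⟩
    intro i hi
    rw [List.foldl_cons, hset, hg i hi]
    by_cases hie : i = c.toNat
    · rw [hie]
      have hset2 : (counts.set c.toNat (counts.getD c.toNat 0 + 1)).getD c.toNat 0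
          = counts.getD c.toNat 0 + 1 := by
        simp [List.getD, hlen ▸ hc128]
      rw [hset2]
      have hcnt : pvCnt (c :: t) c.toNat = pvCnt t c.toNat + 1 := by
        simp [pvCnt]
      rw [hcnt]; push_cast; ring
    · have hne : c.toNat ≠ i := fun hh => hie hh.symm
      have hset2 : (counts.set c.toNat (counts.getD c.toNat 0 + 1)).getD i 0 = counts.getD i 0 := by
        simp [List.getD, List.getElem?_set_ne hne]
      rw [hset2]
      have hcnt : pvCnt (c :: t) i = pvCnt t i := by
        simp [pvCnt, hne]
      rw [hcnt]

theorem pvCounts_getD (cs : List Char) (hdom : ∀ c ∈ cs, c.toNat < 128) (i : Nat) (hi : i < 128) :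
    (eleCounts cs).getD i 0 = (pvCnt cs i : Int) := by
  obtain ⟨_, hg⟩ := pvCounts_fold cs (List.replicate 128 0) (by simp) hdom
  rw [eleCounts, hg i hi]
  have h0 : (List.replicate 128 (0:Int)).getD i 0 = 0 := by
    rw [List.getD_replicate]; exact hi
  rw [h0]; simp

-- ===== sorted = expansion over the codes =====
theorem pvCnt_eq_count (cs : List Char) (a : Char) : pvCnt cs a.toNat = cs.count a := by
  rw [pvCnt, List.count_eq_countP]
  apply List.countP_congr
  intro c _
  by_cases h : c = a
  · subst h; simp
  · have hne : c.toNat ≠ a.toNat := fun hh => h (pvChar_eq_of_toNat c a hh)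
    simp [h, hne]

theorem pvCount_expand (cs : List Char) (a : Char) : ∀ (codes : List Nat), codes.Nodup →
    (∀ i ∈ codes, i < 128) →
    (pvExpand cs codes (fun _ => true)).count a
      = if a.toNat ∈ codes then pvCnt cs a.toNat else 0 := by
  intro codes
  induction codes with
  | nil => intro _ _; simp [pvExpand]
  | cons i rest ih =>
    intro hnd hlt
    have hi : i < 128 := hlt i List.mem_cons_self
    rw [pvExpand_cons, if_pos rfl, List.count_append,
      ih hnd.of_cons (fun j hj => hlt j (List.mem_cons_of_mem _ hj))]
    rw [List.count_replicate]
    by_cases he : a = Char.ofNat i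
    · have hat : a.toNat = i := by rw [he, pvToNat_ofNat i hi]
      have hnr : a.toNat ∉ rest := by rw [hat]; exact (List.nodup_cons.mp hnd).1
      simp [he, pvToNat_ofNat i hi]
      exact fun h => absurd h (hat ▸ hnr)
    · have hat : a.toNat ≠ i := by
        intro h
        exact he (pvChar_eq_of_toNat a (Char.ofNat i) (by rw [pvToNat_ofNat i hi, h]))
      have hbe : (Char.ofNat i == a) = false := by
        simp
        intro h; exact he h.symm
      rw [if_neg (by simp [hbe])]
      simp [List.mem_cons, hat]

theorem pvExpand_perm (cs : List Char) (hdom : ∀ c ∈ cs, c.toNat < 128) :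
    (pvExpand cs (List.range 128) (fun _ => true)).Perm cs := by
  apply List.perm_iff_count.mpr
  intro a
  rw [pvCount_expand cs a (List.range 128) (List.nodup_range) (fun i hi => List.mem_range.mp hi)]
  by_cases ha : a.toNat < 128
  · rw [if_pos (List.mem_range.mpr ha), pvCnt_eq_count]
  · rw [if_neg (fun h => ha (List.mem_range.mp h))]
    symm
    rw [List.count_eq_zero]
    intro hmem
    exact ha (hdom a hmem)

theorem pvExpand_pairwise (cs : List Char) : ∀ (codes : List Nat) (keep : Nat → Bool),
    codes.Pairwise (· < ·) → (∀ i ∈ codes, i < 128) →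
    (pvExpand cs codes keep).Pairwise (· ≤ ·) := by
  intro codes
  induction codes with
  | nil => intro keep _ _; simp [pvExpand]
  | cons i rest ih =>
    intro keep hpw hlt
    have hi : i < 128 := hlt i List.mem_cons_self
    rw [pvExpand_cons]
    apply List.pairwise_append.mpr
    refine ⟨?_, ih keep (List.pairwise_cons.mp hpw).2 (fun j hj => hlt j (List.mem_cons_of_mem _ hj)), ?_⟩
    · by_cases hk : keep i = true
      · rw [if_pos hk]; exact List.pairwise_replicate.mpr (Or.inr le_rfl)
      · rw [if_neg hk]; simp
    · intro x hx y hy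
      by_cases hk : keep i = true
      · rw [if_pos hk] at hx
        have hxe : x = Char.ofNat i := List.eq_of_mem_replicate hx
        rcases pvMem_expand cs rest keep y hy with ⟨j, hj, _, hye⟩
        have hij : i < j := (List.pairwise_cons.mp hpw).1 j hj
        have hj128 : j < 128 := hlt j (List.mem_cons_of_mem _ hj)
        rw [hxe, hye, pvChar_le_iff, pvToNat_ofNat i hi, pvToNat_ofNat j hj128]
        omega
      · rw [if_neg hk] at hx; simp at hx

theorem pvSorted_eq_expand (cs : List Char) (hdom : ∀ c ∈ cs, c.toNat < 128) :
    PySem.List.sorted cs (fun c => c) false = pvExpand cs (List.range 128) (fun _ => true) :=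
  PySem.List.sorted_id_eq_of_perm_of_pairwise cs _ (pvExpand_perm cs hdom)
    (pvExpand_pairwise cs (List.range 128) _ (List.pairwise_lt_range) (fun i hi => List.mem_range.mp hi))

theorem pvFilter_expand (cs : List Char) (p : Char → Bool) : ∀ (codes : List Nat) (keep : Nat → Bool),
    (pvExpand cs codes keep).filter p = pvExpand cs codes (fun i => keep i && p (Char.ofNat i)) := by
  intro codes
  induction codes with
  | nil => intro keep; rfl
  | cons i rest ih =>
    intro keep
    rw [pvExpand_cons, pvExpand_cons, List.filter_append, ih]
    congr 1
    by_cases hk : keep i = true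
    · rw [if_pos hk, List.filter_replicate]
      cases hpc : p (Char.ofNat i) <;> simp [hk, hpc]
    · have hkf : keep i = false := Bool.eq_false_iff.mpr hk
      simp [hkf]

-- the lowercase part of the full expansion is exactly pvLoRest cs 97
theorem pvLo_eq_loRest (cs : List Char) :
    pvExpand cs (List.range 128) (fun i => decide (97 ≤ i) && decide (i ≤ 122)) = pvLoRest cs 97 := by
  have hsplit : List.range 128 = List.range' 0 97 ++ List.range' 97 26 ++ List.range' 123 5 := by
    rw [List.range_eq_range']
    rw [show (128:Nat) = 97 + (26 + 5) by rfl, ← List.range'_append, ← List.range'_append]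
    norm_num
  rw [hsplit, pvExpand_append, pvExpand_append]
  rw [pvExpand_none cs (List.range' 0 97) _ (by
    intro i hi
    have := List.mem_range'_1.mp hi
    simp; omega)]
  rw [pvExpand_none cs (List.range' 123 5) _ (by
    intro i hi
    have := List.mem_range'_1.mp hi
    simp; omega)]
  rw [pvExpand_congr cs (List.range' 97 26) _ (fun _ => true) (by
    intro i hi
    have := List.mem_range'_1.mp hi
    simp; omega)]
  simp [pvLoRest]

-- ===== pvLoRest structure =====
theorem pvLoRest_nil (cs : List Char) (nxt : Nat) (h : 123 ≤ nxt) : pvLoRest cs nxt = [] := by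
  rw [pvLoRest, show 123 - nxt = 0 by omega]
  rfl

theorem pvLoRest_cons (cs : List Char) (nxt : Nat) (h : nxt ≤ 122) :
    pvLoRest cs nxt = List.replicate (pvCnt cs nxt) (Char.ofNat nxt) ++ pvLoRest cs (nxt + 1) := by
  rw [pvLoRest, show 123 - nxt = (123 - (nxt+1)) + 1 by omega, List.range'_succ, pvExpand_cons]
  simp [pvLoRest]

theorem pvMem_loRest (cs : List Char) (nxt : Nat) (l : Char) (hl : l ∈ pvLoRest cs nxt) :
    nxt ≤ l.toNat ∧ l.toNat < 123 := by
  rcases pvMem_expand cs _ _ l hl with ⟨i, hi, _, he⟩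
  have := List.mem_range'_1.mp hi
  rw [he, pvToNat_ofNat i (by omega)]
  omega

-- ===== takeWhile/dropWhile helpers =====
theorem pvTakeWhile_nil (p : Char → Bool) (l : List Char) (h : ∀ a ∈ l, p a = false) :
    l.takeWhile p = [] := by
  cases l with
  | nil => rfl
  | cons x xs => simp [h x List.mem_cons_self]

theorem pvDropWhile_all (p : Char → Bool) (l : List Char) (h : ∀ a ∈ l, p a = false) :
    l.dropWhile p = l := by
  cases l with
  | nil => rfl
  | cons x xs => simp [h x List.mem_cons_self]

theorem pvTakeWhile_dropWhile (p : Char → Bool) : ∀ l : List Char,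
    (l.dropWhile p).takeWhile p = [] := by
  intro l
  induction l with
  | nil => rfl
  | cons x xs ih =>
    by_cases hp : p x = true
    · rw [List.dropWhile_cons_of_pos hp]; exact ih
    · rw [List.dropWhile_cons_of_neg (by simp [hp])]
      simp [hp]

theorem pvDropWhile_idem (p : Char → Bool) : ∀ l : List Char,
    (l.dropWhile p).dropWhile p = l.dropWhile p := by
  intro l
  induction l with
  | nil => rfl
  | cons x xs ih =>
    by_cases hp : p x = true
    · rw [List.dropWhile_cons_of_pos hp]; exact ih
    · rw [List.dropWhile_cons_of_neg (by simp [hp]), List.dropWhile_cons_of_neg (by simp [hp])]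

-- ===== merge-group lemmas =====
theorem pvMergeC_cons (u : Char) (up2 : List Char) : ∀ lo : List Char,
    pvMergeC (u :: up2) lo
      = lo.takeWhile (fun l => decide (l < PySem.Chars.lowerChar u)) ++
        u :: pvMergeC up2 (lo.dropWhile (fun l => decide (l < PySem.Chars.lowerChar u))) := by
  intro lo
  induction lo with
  | nil => simp [pvMergeC_nil_right]
  | cons b l' ih =>
    by_cases hc : PySem.Chars.lowerChar u = b ∨ PySem.Chars.lowerChar u < b
    · have hb : ¬ b < PySem.Chars.lowerChar u := by
        rcases hc with h | h
        · rw [← h]; exact lt_irrefl _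
        · exact fun h2 => absurd h (not_lt.mpr (le_of_lt h2))
      rw [pvMergeC, if_pos hc]
      rw [List.takeWhile_cons_of_neg (by simp [hb]), List.dropWhile_cons_of_neg (by simp [hb])]
      simp
    · have hb : b < PySem.Chars.lowerChar u := by
        push_neg at hc
        exact lt_of_le_of_ne hc.2 (fun h => hc.1 h.symm)
      rw [pvMergeC, if_neg hc]
      rw [List.takeWhile_cons_of_pos (by simp [hb]), List.dropWhile_cons_of_pos (by simp [hb])]
      rw [ih]
      simp

theorem pvMergeC_group (u : Char) (n : Nat) (up' : List Char) : ∀ lo : List Char,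
    pvMergeC (List.replicate (n + 1) u ++ up') lo
      = lo.takeWhile (fun l => decide (l < PySem.Chars.lowerChar u)) ++
        (List.replicate (n + 1) u ++
          pvMergeC up' (lo.dropWhile (fun l => decide (l < PySem.Chars.lowerChar u)))) := by
  induction n with
  | zero =>
    intro lo
    rw [List.replicate_one]
    simpa using pvMergeC_cons u up' lo
  | succ m ih =>
    intro lo
    rw [show List.replicate (m + 1 + 1) u ++ up' = u :: (List.replicate (m + 1) u ++ up') by
      rw [List.replicate_succ]; simp]
    rw [pvMergeC_cons, ih, pvTakeWhile_dropWhile, pvDropWhile_idem]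
    simp [List.replicate_succ]

-- ===== flush =====
theorem pvFlush_spec (counts : List Int) (cs : List Char)
    (hc : ∀ i, i < 128 → counts.getD i 0 = (pvCnt cs i : Int)) :
    ∀ fuel nxt limit, limit - nxt ≤ fuel → 97 ≤ nxt →
    eleFlush counts nxt limit
      = ((pvLoRest cs nxt).takeWhile (fun l => decide (l.toNat < limit)),
          max nxt (min limit 123)) ∧
    (pvLoRest cs nxt).dropWhile (fun l => decide (l.toNat < limit))
      = pvLoRest cs (max nxt (min limit 123)) := by
  intro fuel
  induction fuel with
  | zero =>
    intro nxt limit hf h97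
    have hstop : limit ≤ nxt := by omega
    have hall : ∀ a ∈ pvLoRest cs nxt, (decide (a.toNat < limit)) = false := by
      intro a ha
      have := (pvMem_loRest cs nxt a ha).1
      simp; omega
    have hmax : max nxt (min limit 123) = nxt := by omega
    rw [eleFlush, if_neg (by omega), pvTakeWhile_nil _ _ hall, pvDropWhile_all _ _ hall, hmax]
    exact ⟨rfl, rfl⟩
  | succ fuel ih =>
    intro nxt limit hf h97
    by_cases hcond : nxt ≤ 122 ∧ nxt < limit
    · have hcons := pvLoRest_cons cs nxt hcond.1
      have hgroup : ∀ a ∈ List.replicate (pvCnt cs nxt) (Char.ofNat nxt),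
          (decide (a.toNat < limit)) = true := by
        intro a ha
        rw [List.eq_of_mem_replicate ha, pvToNat_ofNat nxt (by omega)]
        simp [hcond.2]
      obtain ⟨ihf, ihd⟩ := ih (nxt + 1) limit (by omega) (by omega)
      have hpg : PySem.List.pyGetD counts ((nxt : Nat) : Int) 0 = (pvCnt cs nxt : Int) := by
        rw [PySem.List.pyGetD_natCast]; exact hc nxt (by omega)
      have hmax : max (nxt + 1) (min limit 123) = max nxt (min limit 123) := by omega
      constructor
      · rw [eleFlush, if_pos hcond, ihf]
        rw [hcons, List.takeWhile_append_of_pos hgroup, hpg, hmax]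
        simp
      · rw [hcons, List.dropWhile_append_of_pos hgroup, ihd, hmax]
    · have hall : ∀ a ∈ pvLoRest cs nxt, (decide (a.toNat < limit)) = false := by
        intro a ha
        obtain ⟨h1, h2⟩ := pvMem_loRest cs nxt a ha
        simp; omega
      have hmax : max nxt (min limit 123) = nxt := by omega
      rw [eleFlush, if_neg hcond, pvTakeWhile_nil _ _ hall, pvDropWhile_all _ _ hall, hmax]
      exact ⟨rfl, rfl⟩

-- ===== the code sweep =====
theorem pvCodeLoop_spec (counts : List Int) (cs : List Char)
    (hc : ∀ i, i < 128 → counts.getD i 0 = (pvCnt cs i : Int)) :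
    ∀ (codes : List Nat) (out : List Char) (nxt : Nat), 97 ≤ nxt →
    (∀ i ∈ codes, i < 128) →
    (eleCodeLoop counts codes out nxt).1 ++ pvLoRest cs (eleCodeLoop counts codes out nxt).2
      = out ++ pvMergeC (pvExpand cs codes pvKeepUp) (pvLoRest cs nxt)
    ∧ 97 ≤ (eleCodeLoop counts codes out nxt).2 := by
  intro codes
  induction codes with
  | nil =>
    intro out nxt h97 _
    refine ⟨?_, h97⟩
    rw [eleCodeLoop, pvExpand_nil, pvMergeC]
  | cons code rest ih =>
    intro out nxt h97 hlt
    have hcode : code < 128 := hlt code List.mem_cons_self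
    have hpg : PySem.List.pyGetD counts ((code : Nat) : Int) 0 = (pvCnt cs code : Int) := by
      rw [PySem.List.pyGetD_natCast]; exact hc code hcode
    have hcharrange : ('a' ≤ Char.ofNat code ∧ Char.ofNat code ≤ 'z') ↔ (97 ≤ code ∧ code ≤ 122) := by
      rw [pvChar_le_iff, pvChar_le_iff, pvToNat_ofNat code hcode]
      have ha : ('a' : Char).toNat = 97 := by decide
      have hz : ('z' : Char).toNat = 122 := by decide
      rw [ha, hz]
    by_cases hcond : PySem.List.pyGetD counts ((code : Nat) : Int) 0 ≠ 0 ∧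
        ¬('a' ≤ Char.ofNat code ∧ Char.ofNat code ≤ 'z')
    · -- emitted block
      have hcnt0 : pvCnt cs code ≠ 0 := by
        intro h; apply hcond.1; rw [hpg, h]; rfl
      have hkeep : pvKeepUp code = true := by
        rw [pvKeepUp]
        have := hcharrange.not.mp hcond.2
        rcases Nat.lt_or_ge code 97 with h1 | h1
        · simp; omega
        · rcases Nat.lt_or_ge 122 code with h2 | h2
          · simp; omega
          · exact absurd ⟨h1, h2⟩ this
      obtain ⟨n, hn⟩ : ∃ n, pvCnt cs code = n + 1 :=
        ⟨pvCnt cs code - 1, by omega⟩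
      set limit := (PySem.Chars.lowerChar (Char.ofNat code)).toNat with hlimit
      obtain ⟨hff, hfd⟩ := pvFlush_spec counts cs hc (limit - nxt) nxt limit le_rfl h97
      have hpred : (fun l => decide (l.toNat < limit))
          = (fun l : Char => decide (l < PySem.Chars.lowerChar (Char.ofNat code))) := by
        funext l
        exact decide_eq_decide.mpr (by rw [hlimit, pvChar_lt_iff])
      rw [eleCodeLoop, if_pos hcond]
      obtain ⟨ih1, ih2⟩ := ih
        (out ++ (eleFlush counts nxt limit).1 ++
          List.replicate (PySem.List.pyGetD counts ((code : Nat) : Int) 0).toNat (Char.ofNat code))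
        (eleFlush counts nxt limit).2 (by rw [hff]; omega)
        (fun j hj => hlt j (List.mem_cons_of_mem _ hj))
      refine ⟨?_, ih2⟩
      rw [ih1]
      rw [hff]
      rw [pvExpand_cons, if_pos hkeep, hn, pvMergeC_group, hpred, ← hfd, hpred]
      rw [hpg, hn]
      simp only [Int.toNat_natCast]
      simp
    · -- skipped code
      rw [eleCodeLoop, if_neg hcond]
      obtain ⟨ih1, ih2⟩ := ih out nxt h97 (fun j hj => hlt j (List.mem_cons_of_mem _ hj))
      refine ⟨?_, ih2⟩
      rw [ih1]
      have hexp : pvExpand cs (code :: rest) pvKeepUp = pvExpand cs rest pvKeepUp := by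
        rw [pvExpand_cons]
        by_cases hk : pvKeepUp code = true
        · have hcz : pvCnt cs code = 0 := by
            by_contra hnz
            apply hcond
            constructor
            · rw [hpg]; exact_mod_cast hnz
            · intro hch
              have := hcharrange.mp hch
              rw [pvKeepUp] at hk
              simp [this.1, this.2] at hk
          rw [if_pos hk, hcz]
          rfl
        · rw [if_neg hk]; rfl
      rw [hexp]

-- ===== final lowercase flush (the trailing for-loop of B) =====
theorem pvTailFold (counts : List Int) (cs : List Char)
    (hc : ∀ i, i < 128 → counts.getD i 0 = (pvCnt cs i : Int)) :
    ∀ fuel (nxt : Nat) (out : List Char), 123 - nxt ≤ fuel → 97 ≤ nxt →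
    (PySem.List.pyRange (nxt : Int) 123 1).foldl
        (fun out l => out ++ List.replicate (PySem.List.pyGetD counts l 0).toNat (Char.ofNat l.toNat))
        out
      = out ++ pvLoRest cs nxt := by
  intro fuel
  induction fuel with
  | zero =>
    intro nxt out hf h97
    rw [PySem.List.pyRange_one_eq_nil (by exact_mod_cast (by omega : (123:Nat) ≤ nxt)),
      List.foldl_nil, pvLoRest_nil cs nxt (by omega)]
    simp
  | succ fuel ih =>
    intro nxt out hf h97
    by_cases h : nxt < 123
    · rw [PySem.List.pyRange_one_cons (by exact_mod_cast h), List.foldl_cons]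
      have h1 : ((nxt : Int)) + 1 = (((nxt + 1 : Nat)) : Int) := by push_cast; ring
      rw [h1, ih (nxt + 1) _ (by omega) (by omega)]
      rw [pvLoRest_cons cs nxt (by omega)]
      rw [PySem.List.pyGetD_natCast, hc nxt (by omega), Int.toNat_natCast, Int.toNat_natCast]
      simp
    · rw [PySem.List.pyRange_one_eq_nil (by exact_mod_cast (by omega : (123:Nat) ≤ nxt)),
        List.foldl_nil, pvLoRest_nil cs nxt (by omega)]
      simp

-- ===== main equality =====
theorem pvMain (s : String) (hDom : Dom_ele_func s) : ele_func s = ele_func_alt s := by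
  have hdom : ∀ c ∈ s.toList, c.toNat < 128 := by
    intro c hcm
    have := (List.all_eq_true.mp hDom) c hcm
    simp only [pvDomChar, Bool.or_eq_true, Bool.and_eq_true, decide_eq_true_eq, beq_iff_eq] at this
    omega
  set cs := s.toList with hcs
  -- A's side: partition of the sorted list, merged by pvMergeC
  have hA : ele_func s
      = String.mk (pvMergeC ((PySem.List.sorted cs (fun c => c) false).filter pvIsUp)
          ((PySem.List.sorted cs (fun c => c) false).filter (fun c => !pvIsUp c))) := by
    unfold ele_func
    rw [← hcs, pvFold_part]
    simp only [List.nil_append]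
    rw [pvLoop_eq _ _ _ 0 0 [] (by omega) (by omega) (by omega)]
    simp
  -- rewrite both partitions as expansions over the 128 codes
  have hexp := pvSorted_eq_expand cs hdom
  have hup : (PySem.List.sorted cs (fun c => c) false).filter pvIsUp
      = pvExpand cs (List.range 128) pvKeepUp := by
    rw [hexp, pvFilter_expand]
    apply pvExpand_congr
    intro i hi
    rw [pvIsUp_ofNat i (List.mem_range.mp hi)]
    rfl
  have hlo : (PySem.List.sorted cs (fun c => c) false).filter (fun c => !pvIsUp c)
      = pvLoRest cs 97 := by
    rw [hexp, pvFilter_expand, ← pvLo_eq_loRest cs]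
    apply pvExpand_congr
    intro i hi
    rw [pvIsUp_ofNat i (List.mem_range.mp hi)]
    simp
  -- B's side
  have hc : ∀ i, i < 128 → (eleCounts cs).getD i 0 = (pvCnt cs i : Int) :=
    fun i hi => pvCounts_getD cs hdom i hi
  obtain ⟨hloop, h97⟩ := pvCodeLoop_spec (eleCounts cs) cs hc (List.range 128) [] 97
    (by omega) (fun i hi => List.mem_range.mp hi)
  have hB0 : ele_func_alt s
      = String.mk ((PySem.List.pyRange
            (((eleCodeLoop (eleCounts cs) (List.range 128) [] 97).2 : Nat) : Int) 123 1).foldl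
          (fun out l => out ++
            List.replicate (PySem.List.pyGetD (eleCounts cs) l 0).toNat (Char.ofNat l.toNat))
          (eleCodeLoop (eleCounts cs) (List.range 128) [] 97).1) := rfl
  have hB : ele_func_alt s
      = String.mk ((eleCodeLoop (eleCounts cs) (List.range 128) [] 97).1
          ++ pvLoRest cs (eleCodeLoop (eleCounts cs) (List.range 128) [] 97).2) := by
    rw [hB0]
    rw [pvTailFold (eleCounts cs) cs hc
      (123 - (eleCodeLoop (eleCounts cs) (List.range 128) [] 97).2)
      (eleCodeLoop (eleCounts cs) (List.range 128) [] 97).2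
      (eleCodeLoop (eleCounts cs) (List.range 128) [] 97).1 le_rfl h97]
  rw [hA, hB, hloop, hup, hlo]
  simp

-- ===== VERDICT (by name: the statement is the Claim_ definition above) =====
theorem ele_func_spec : Claim_equal_ele_func := by
  intro s hDom
  unfold Spec_ele_func
  exact pvMain s hDom
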